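-- pv_equiv track=rewrite | github.com/pytorch/pytorch | .venv311/lib/python3.11/site-packages/networkx/algorithms/threshold.py | left_d_threshold_sequence
-- ===== SOURCE A (Python) =====
-- def left_d_threshold_sequence(n, m):
--     """
--     Returns a "left-dominated" threshold sequence with `n` vertices and `m` edges.
--
--     Each vertex in the sequence is either dominant or isolated.
--     In the "left-dominated" version, once the basic sequence is formed,
--     isolated vertices may be flipped to dominant from the left in order
--     to reach the target number of edges.
--
--     Parameters
--     ----------
--     n : int
--         Number of vertices.
--     m : int
--         Number of edges.
--
--     Returns
--     -------
--     A list of 'd' (dominant) and 'i' (isolated) forming a left-dominated threshold sequence.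
--
--     Raises
--     ------
--     ValueError
--         If `m` exceeds the maximum number of edges.
--
--     Examples
--     --------
--     For certain small cases, both left and right dominated versions produce
--     the same sequence. However, for larger values of `m`, the difference in
--     flipping order becomes evident. For instance, compare the sequences for
--     ``n=6, m=8``:
--
--     >>> from networkx.algorithms.threshold import left_d_threshold_sequence
--     >>> seq = left_d_threshold_sequence(6, 8)
--     >>> seq
--     ['d', 'd', 'd', 'i', 'i', 'd']
--
--     In contrast, the right-dominated version yields:
--
--     >>> from networkx.algorithms.threshold import right_d_threshold_sequence
--     >>> right_seq = right_d_threshold_sequence(6, 8)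
--     >>> right_seq
--     ['d', 'i', 'i', 'd', 'i', 'd']
--     """
--
--     cs = ["d"] + ["i"] * (n - 1)  # create sequence with n insolated nodes
--
--     #  m <n : not enough edges, make disconnected
--     if m < n:
--         cs[m] = "d"
--         return cs
--
--     # too many edges
--     if m > n * (n - 1) / 2:
--         raise ValueError("Too many edges for this many nodes.")
--
--     # Connected case when M>N-1
--     cs[n - 1] = "d"
--     sum = n - 1
--     ind = 1
--     while sum < m:
--         cs[ind] = "d"
--         sum += ind
--         ind += 1
--     if sum > m:  # be sure not to change the first vertex
--         cs[sum - m] = "i"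
--     return cs
-- ===== SOURCE B (Python) =====
-- def left_d_threshold_sequence(n, m):
--     cs = ["d"] + ["i"] * (n - 1)  # create sequence with n isolated nodes
--
--     # m < n : not enough edges, make disconnected
--     if m < n:
--         cs[m] = "d"
--         return cs
--
--     # too many edges
--     if m > n * (n - 1) / 2:
--         raise ValueError("Too many edges for this many nodes.")
--
--     # Connected case: instead of flipping one vertex at a time, binary-search
--     # the number k of flips needed (smallest k with k*(k+1)//2 >= t) and do
--     # one bulk slice assignment.
--     cs[n - 1] = "d"
--     t = m - (n - 1)  # t >= 1 here since m >= n
--     lo, hi = 1, t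
--     while lo < hi:
--         mid = (lo + hi) // 2
--         if mid * (mid + 1) // 2 >= t:
--             hi = mid
--         else:
--             lo = mid + 1
--     k = lo
--     cs[1 : k + 1] = ["d"] * k
--     s = n - 1 + k * (k + 1) // 2
--     if s > m:  # overshoot: flip one back (never the first vertex)
--         cs[s - m] = "i"
--     return cs
-- ===== Notes on version B (the rewrite author's own statement) =====
-- stated objective: alternative
-- what changed: A's one-flip-per-iteration while loop (sum/ind accumulator with a list write per step) is replaced by a binary search for the number k of dominant flips (smallest k with k*(k+1)//2 >= m-(n-1)) followed by one bulk slice assignment cs[1:k+1] = ['d']*k.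
import Mathlib
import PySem

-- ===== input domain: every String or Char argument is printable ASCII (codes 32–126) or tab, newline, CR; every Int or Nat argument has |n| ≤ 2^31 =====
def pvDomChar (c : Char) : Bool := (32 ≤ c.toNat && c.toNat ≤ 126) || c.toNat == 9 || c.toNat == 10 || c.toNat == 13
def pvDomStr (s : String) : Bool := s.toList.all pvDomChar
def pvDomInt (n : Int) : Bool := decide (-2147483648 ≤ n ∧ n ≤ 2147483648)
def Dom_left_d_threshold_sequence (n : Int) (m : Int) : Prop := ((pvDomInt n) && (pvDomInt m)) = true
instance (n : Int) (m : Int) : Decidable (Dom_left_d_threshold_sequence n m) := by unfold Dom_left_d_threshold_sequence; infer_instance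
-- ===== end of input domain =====

-- B replaces A's one-flip-at-a-time while loop by a binary search for the number of
-- flips plus one bulk slice assignment (alternative decomposition; return value only).

-- ===== PORT A =====
-- A's while loop 'while sum < m: cs[ind]="d"; sum += ind; ind += 1'.
-- Fuel only makes it total: with ind ≥ 1 each step raises sum by ≥ 1, so
-- (m - sum).toNat steps always suffice.
def pvALoop (m : Int) : Nat → List String → Int → Int → List String × Int
  | 0, cs, s, _ => (cs, s)
  | fuel+1, cs, s, i =>
    if s < m then pvALoop m fuel (PySem.List.pySetD cs i "d") (s + i) (i + 1) else (cs, s)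

def left_d_threshold_sequence (n : Int) (m : Int) : List String :=
  let cs := "d" :: List.replicate (n - 1).toNat "i"   -- ["d"] + ["i"]*(n-1)
  if m < n then PySem.List.pySetD cs m "d"            -- cs[m] = "d" (IndexError excluded by Pre_)
  -- 'm > n*(n-1)/2' (float division): exact as 2*m > n*(n-1) on Dom; ValueError, excluded by Pre_
  else if 2 * m > n * (n - 1) then []
  else
    let cs2 := PySem.List.pySetD cs (n - 1) "d"
    let p := pvALoop m (m - (n - 1)).toNat cs2 (n - 1) 1
    if p.2 > m then PySem.List.pySetD p.1 (p.2 - m) "i" else p.1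

-- ===== PORT B =====
-- B's 'while lo < hi: mid=(lo+hi)//2; …'; fuel (hi-lo).toNat only makes it total.
def pvBSearch (t : Int) : Nat → Int → Int → Int
  | 0, lo, _ => lo
  | fuel+1, lo, hi =>
    if lo < hi then
      let mid := PySem.Int.floordiv (lo + hi) 2
      if t ≤ PySem.Int.floordiv (mid * (mid + 1)) 2 then pvBSearch t fuel lo mid
      else pvBSearch t fuel (mid + 1) hi
    else lo

def left_d_threshold_sequence_alt (n : Int) (m : Int) : List String :=
  let cs := "d" :: List.replicate (n - 1).toNat "i"
  if m < n then PySem.List.pySetD cs m "d"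
  else if 2 * m > n * (n - 1) then []                  -- ValueError, excluded by Pre_
  else
    let cs2 := PySem.List.pySetD cs (n - 1) "d"
    let t := m - (n - 1)
    let k := pvBSearch t (t - 1).toNat 1 t
    -- cs[1:k+1] = ["d"]*k  (slice assignment, written out)
    let cs3 := cs2.take 1 ++ List.replicate k.toNat "d" ++ cs2.drop (k + 1).toNat
    let s := (n - 1) + PySem.Int.floordiv (k * (k + 1)) 2
    if s > m then PySem.List.pySetD cs3 (s - m) "i" else cs3

-- ===== PRECONDITION & SPEC =====
-- Pre_ excludes exactly the inputs where A raises: ValueError when m exceeds n(n-1)/2,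
-- IndexError when the m<n branch indexes outside [-n, n-1] (resp. outside {-1,0} for n ≤ 0),
-- and the n ≤ 0 connected cases whose loop or cs[n-1] indexes out of range.
def Pre_left_d_threshold_sequence (n : Int) (m : Int) : Prop :=
  (m < n ∧ ((1 ≤ n ∧ -n ≤ m) ∨ (n = 0 ∧ m = -1))) ∨
  (n ≤ m ∧ 2 * m ≤ n * (n - 1) ∧ 1 ≤ n)
instance (n : Int) (m : Int) : Decidable (Pre_left_d_threshold_sequence n m) := by
  unfold Pre_left_d_threshold_sequence; infer_instance

def pvWitness_left_d_threshold_sequence : Int × Int := (6, 8)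

def Spec_left_d_threshold_sequence (n : Int) (m : Int) (out : List String) : Prop := out = left_d_threshold_sequence_alt n m
instance (n : Int) (m : Int) (out : List String) : Decidable (Spec_left_d_threshold_sequence n m out) := by unfold Spec_left_d_threshold_sequence; infer_instance

-- ===== CLAIM (what is proved, stated in full; the proofs are below) =====
def Claim_equal_left_d_threshold_sequence : Prop := ∀ (n : Int) (m : Int), Dom_left_d_threshold_sequence n m → Pre_left_d_threshold_sequence n m → Spec_left_d_threshold_sequence n m (left_d_threshold_sequence n m)

-- ===== LEMMAS AND PROOFS =====

-- write "d" at positions i, i+1, …, i+j-1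
def pvWr : List String → Int → Nat → List String
  | cs, _, 0 => cs
  | cs, i, j+1 => pvWr (PySem.List.pySetD cs i "d") (i + 1) j

-- i + (i+1) + … + (i+j-1)
def pvTri : Int → Nat → Int
  | _, 0 => 0
  | i, j+1 => i + pvTri (i + 1) j

theorem pvTri_double (j : Nat) : ∀ i : Int, 2 * pvTri i j = 2 * i * j + (j : Int) * ((j : Int) - 1) := by
  induction j with
  | zero => intro i; simp [pvTri]
  | succ j ih =>
    intro i
    have h := ih (i + 1)
    simp only [pvTri]
    push_cast at h ⊢
    linear_combination h

theorem pvALoop_eq (m : Int) (j : Nat) : ∀ (fuel : Nat) (cs : List String) (s i : Int),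
    j ≤ fuel → m ≤ s + pvTri i j → (∀ j' : Nat, j' < j → s + pvTri i j' < m) →
    pvALoop m fuel cs s i = (pvWr cs i j, s + pvTri i j) := by
  induction j with
  | zero =>
    intro fuel cs s i _ hle _
    simp only [pvTri, add_zero] at hle ⊢
    cases fuel with
    | zero => simp [pvALoop, pvWr]
    | succ f => simp [pvALoop, pvWr, not_lt.mpr hle]
  | succ j ih =>
    intro fuel cs s i hfuel hle hmin
    have hs : s < m := by have := hmin 0 (Nat.succ_pos j); simpa [pvTri] using this
    cases fuel with
    | zero => omega
    | succ f =>
      simp only [pvALoop, if_pos hs]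
      have := ih f (PySem.List.pySetD cs i "d") (s + i) (i + 1)
        (by omega)
        (by simpa [pvTri, add_assoc] using hle)
        (by intro j' hj'; have := hmin (j' + 1) (by omega); simpa [pvTri, add_assoc] using this)
      simpa [pvWr, pvTri, add_assoc] using this

theorem pvBSearch_spec (t : Int) : ∀ (fuel : Nat) (lo hi : Int),
    (hi - lo).toNat ≤ fuel → 1 ≤ lo → lo ≤ hi → 2 * t ≤ hi * (hi + 1) →
    (∀ j : Int, 1 ≤ j → j < lo → j * (j + 1) < 2 * t) →
    (lo ≤ pvBSearch t fuel lo hi ∧ pvBSearch t fuel lo hi ≤ hi ∧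
      2 * t ≤ pvBSearch t fuel lo hi * (pvBSearch t fuel lo hi + 1) ∧
      (∀ j : Int, 1 ≤ j → j < pvBSearch t fuel lo hi → j * (j + 1) < 2 * t)) := by
  intro fuel
  induction fuel with
  | zero =>
    intro lo hi hfuel _ hlh htop hmin
    have : lo = hi := by omega
    subst this
    exact ⟨le_refl _, le_refl _, htop, hmin⟩
  | succ f ih =>
    intro lo hi hfuel hlo hlh htop hmin
    by_cases hlt : lo < hi
    · simp only [pvBSearch, if_pos hlt]
      have hmid : PySem.Int.floordiv (lo + hi) 2 = (lo + hi) / 2 :=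
        PySem.Int.floordiv_eq_ediv_of_pos (by norm_num)
      set mid := PySem.Int.floordiv (lo + hi) 2 with hmdef
      have hb1 : lo ≤ mid := by rw [hmid]; omega
      have hb2 : mid < hi := by rw [hmid]; omega
      obtain ⟨r, hr⟩ : Even (mid * (mid + 1)) := Int.even_mul_succ_self mid
      have hfd : PySem.Int.floordiv (mid * (mid + 1)) 2 = r := by
        rw [PySem.Int.floordiv_eq_ediv_of_pos (by norm_num)]; omega
      by_cases hc : t ≤ PySem.Int.floordiv (mid * (mid + 1)) 2
      · simp only [if_pos hc]
        have h2t : 2 * t ≤ mid * (mid + 1) := by rw [hfd] at hc; omega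
        have := ih lo mid (by omega) hlo hb1 h2t hmin
        exact ⟨this.1, le_trans this.2.1 (le_of_lt hb2), this.2.2⟩
      · simp only [if_neg hc]
        have hmlt : mid * (mid + 1) < 2 * t := by rw [hfd] at hc; omega
        have hmin' : ∀ j : Int, 1 ≤ j → j < mid + 1 → j * (j + 1) < 2 * t := by
          intro j hj1 hjm
          by_cases hjlo : j < lo
          · exact hmin j hj1 hjlo
          · have hjmid : j ≤ mid := by omega
            have : j * (j + 1) ≤ mid * (mid + 1) := by nlinarith
            omega
        have := ih (mid + 1) hi (by omega) (by omega) (by omega) htop hmin'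
        exact ⟨le_trans (by omega) this.1, this.2⟩
    · simp only [pvBSearch, if_neg hlt]
      have : lo = hi := le_antisymm hlh (le_of_not_gt hlt)
      exact ⟨le_refl _, hlh, by rw [this]; exact htop, hmin⟩

theorem pvWr_take_drop (j : Nat) : ∀ (cs : List String) (i : Nat), i + j ≤ cs.length →
    pvWr cs (i : Int) j = cs.take i ++ List.replicate j "d" ++ cs.drop (i + j) := by
  induction j with
  | zero => intro cs i _; simp [pvWr]
  | succ j ih =>
    intro cs i hlen
    have hi : i < cs.length := by omega
    simp only [pvWr, PySem.List.pySetD_natCast]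
    have hcast : (i : Int) + 1 = ((i + 1 : Nat) : Int) := by push_cast; ring
    rw [hcast, ih (cs.set i "d") (i + 1) (by simp; omega)]
    rw [List.set_eq_take_append_cons_drop, if_pos hi]
    rw [List.take_append, List.drop_append]
    have h1 : List.drop (i + 1 + j) (List.take i cs) = [] :=
      List.drop_eq_nil_of_le (by simp [List.length_take]; omega)
    have h2 : i + 1 + j - i = j + 1 := by omega
    simp [List.length_take, Nat.min_eq_left hi.le, h1, h2, List.take_take,
      List.replicate_succ, List.drop_drop]
    omega

-- ===== VERDICT (by name: the statement is the Claim_ definition above) =====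
theorem left_d_threshold_sequence_spec : Claim_equal_left_d_threshold_sequence := by
  intro n m _ hpre
  unfold Spec_left_d_threshold_sequence left_d_threshold_sequence left_d_threshold_sequence_alt
  by_cases h1 : m < n
  · simp [h1]
  · obtain ⟨hnm, hbound, hn1⟩ : n ≤ m ∧ 2 * m ≤ n * (n - 1) ∧ 1 ≤ n := by
      rcases hpre with ⟨h, _⟩ | h
      · exact absurd h h1
      · exact h
    have hc : ¬ (2 * m > n * (n - 1)) := not_lt.mpr hbound
    simp only [if_neg h1, if_neg hc]
    have hn3 : 3 ≤ n := by
      rcases (by omega : n = 1 ∨ n = 2 ∨ 3 ≤ n) with h | h | h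
      · subst h; omega
      · subst h; omega
      · exact h
    set cs2 := PySem.List.pySetD ("d" :: List.replicate (n - 1).toNat "i") (n - 1) "d" with hcs2
    have hlen : cs2.length = n.toNat := by
      rw [hcs2, PySem.List.length_pySetD]
      simp; omega
    set t := m - (n - 1) with htdef
    have ht : 1 ≤ t := by omega
    obtain ⟨hk1, hkt, hk2t, hkmin⟩ := pvBSearch_spec t (t - 1).toNat 1 t (by omega)
      le_rfl ht (by nlinarith) (by intro j hj1 hj; omega)
    set k := pvBSearch t (t - 1).toNat 1 t with hkdef
    have hkn : k ≤ n - 2 := by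
      by_contra hcon
      have hcon2 : n - 2 < k := by omega
      have := hkmin (n - 2) (by omega) (by omega)
      nlinarith
    have hjk : ((k.toNat : Int)) = k := Int.toNat_of_nonneg (by omega)
    have htri : 2 * pvTri 1 k.toNat = k * (k + 1) := by
      have h := pvTri_double k.toNat 1
      rw [hjk] at h
      linear_combination h
    have hA := pvALoop_eq m k.toNat t.toNat cs2 (n - 1) 1 (by omega)
      (by linarith)
      (by
        intro j' hj'
        rcases Nat.eq_zero_or_pos j' with h0 | h0
        · subst h0; simp [pvTri]; omega
        · have hmin := hkmin (j' : Int) (by exact_mod_cast h0) (by omega)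
          have h2 := pvTri_double j' 1
          have : 2 * pvTri 1 j' = (j' : Int) * ((j' : Int) + 1) := by linear_combination h2
          linarith)
    rw [hA]
    have hwr : pvWr cs2 (1 : Int) k.toNat
        = cs2.take 1 ++ List.replicate k.toNat "d" ++ cs2.drop (1 + k.toNat) := by
      have := pvWr_take_drop k.toNat cs2 1 (by rw [hlen]; omega)
      simpa using this
    have hdropIdx : (k + 1).toNat = 1 + k.toNat := by omega
    have hsum : PySem.Int.floordiv (k * (k + 1)) 2 = pvTri 1 k.toNat := by
      obtain ⟨r, hr⟩ : Even (k * (k + 1)) := Int.even_mul_succ_self k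
      rw [hr] at htri ⊢
      rw [PySem.Int.floordiv_eq_ediv_of_pos (by norm_num)]
      omega
    simp only [hsum, hdropIdx, hwr]
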